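-- pv_equiv track=rewrite | github.com/vikasgond807/one | keyless_transposition.py | transencrypt
-- ===== SOURCE A (Python) =====
-- def stringifylist(arr):
--     stng=""
--     for i in arr:
--         stng+=str(i)
--     return stng
--
-- def transencrypt(msg):
--     t1=[]
--     t2=[]
--     flag=True
--     for val in msg:
--         if flag:
--             t1.append(val)
--             flag=False
--         else:
--             t2.append(val)
--             flag=True
--     return stringifylist(t1)+stringifylist(t2)
-- ===== SOURCE B (Python) =====
-- def transencrypt(msg):
--     # Gather: output position j takes its character directly from the source
--     # index given by the closed-form inverse-shuffle permutation.
--     n = len(msg)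
--     h = (n + 1) // 2
--     return ''.join(msg[2 * j] if j < h else msg[2 * (j - h) + 1] for j in range(n))
-- ===== Notes on version B (the rewrite author's own statement) =====
-- stated objective: alternative
-- what changed: Instead of splitting the input into two streams (A's flag-toggle loop with two accumulator lists and a stringify helper), B builds the output directly: one pass over output positions j in range(n), fetching each character from the source via the closed-form permutation index 2*j (if j < ceil(n/2)) or 2*(j-h)+1.
import Mathlib
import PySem

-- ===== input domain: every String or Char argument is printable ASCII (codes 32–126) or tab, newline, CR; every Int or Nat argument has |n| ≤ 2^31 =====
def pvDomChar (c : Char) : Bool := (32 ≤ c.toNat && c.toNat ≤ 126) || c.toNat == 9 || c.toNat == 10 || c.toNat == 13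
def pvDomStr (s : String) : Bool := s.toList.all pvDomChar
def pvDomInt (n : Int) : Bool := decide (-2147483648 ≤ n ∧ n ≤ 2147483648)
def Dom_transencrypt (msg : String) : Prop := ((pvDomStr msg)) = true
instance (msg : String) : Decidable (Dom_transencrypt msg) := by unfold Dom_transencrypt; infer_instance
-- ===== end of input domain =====

-- B replaces A's two-stream flag-toggle split (two accumulator lists + stringify helper)
-- by a single gather pass over output positions using the closed-form inverse-shuffle
-- permutation index; same O(n) cost, no speed claim.


-- ===== PORT A =====
-- stringifylist: stng = ""; for i in arr: stng += str(i)   (str of a char is the 1-char string)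
def pvStringify (arr : List Char) : String :=
  arr.foldl (fun stng c => stng ++ String.ofList [c]) ""

def transencrypt (msg : String) : String :=
  let r := msg.toList.foldl
    (fun (st : List Char × List Char × Bool) val =>
      if st.2.2 then (st.1 ++ [val], st.2.1, false) else (st.1, st.2.1 ++ [val], true))
    ([], [], true)
  pvStringify r.1 ++ pvStringify r.2.1

-- ===== PORT B =====
-- n = len(msg); h = (n+1)//2
-- ''.join(msg[2*j] if j < h else msg[2*(j-h)+1] for j in range(n))
-- (the indices 2*j and 2*(j-h)+1 are nonnegative and in range for every j in range(n),
--  so Python's msg[k] is list getD here; ported with Nat indices and List.getD)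
def transencrypt_alt (msg : String) : String :=
  let l := msg.toList
  let n := l.length
  let h := (n + 1) / 2
  String.ofList ((List.range n).map
    (fun j => if j < h then l.getD (2 * j) 'a' else l.getD (2 * (j - h) + 1) 'a'))

-- ===== PRECONDITION & SPEC =====
def Spec_transencrypt (msg : String) (out : String) : Prop := out = transencrypt_alt msg
instance (msg : String) (out : String) : Decidable (Spec_transencrypt msg out) := by unfold Spec_transencrypt; infer_instance

-- ===== CLAIM (what is proved, stated in full; the proofs are below) =====
def Claim_equal_transencrypt : Prop := ∀ (msg : String), Dom_transencrypt msg → Spec_transencrypt msg (transencrypt msg)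

-- ===== LEMMAS AND PROOFS =====

-- every-other-element starting at position 0
def pvEvens {α : Type} : List α → List α
  | [] => []
  | [a] => [a]
  | a :: _ :: l => a :: pvEvens l

@[simp] theorem pvEvens_nil {α : Type} : pvEvens ([] : List α) = [] := rfl
@[simp] theorem pvEvens_cons {α : Type} (a : α) (l : List α) :
    pvEvens (a :: l) = a :: pvEvens l.tail := by cases l <;> rfl

theorem pvStringify_eq (l : List Char) : pvStringify l = String.ofList l := by
  suffices h : ∀ (l : List Char) (s : String),
      l.foldl (fun stng c => stng ++ String.ofList [c]) s = s ++ String.ofList l by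
    simpa using h l ""
  intro l
  induction l with
  | nil => intro s; apply String.ext; simp
  | cons a t ih =>
    intro s
    simp only [List.foldl_cons, ih]
    apply String.ext
    simp

theorem pvLoop_eq (l : List Char) : ∀ (t1 t2 : List Char),
    ((l.foldl
      (fun (st : List Char × List Char × Bool) val =>
        if st.2.2 then (st.1 ++ [val], st.2.1, false) else (st.1, st.2.1 ++ [val], true))
      (t1, t2, true)).1 = t1 ++ pvEvens l ∧
     (l.foldl
      (fun (st : List Char × List Char × Bool) val =>
        if st.2.2 then (st.1 ++ [val], st.2.1, false) else (st.1, st.2.1 ++ [val], true))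
      (t1, t2, true)).2.1 = t2 ++ pvEvens l.tail) ∧
    ((l.foldl
      (fun (st : List Char × List Char × Bool) val =>
        if st.2.2 then (st.1 ++ [val], st.2.1, false) else (st.1, st.2.1 ++ [val], true))
      (t1, t2, false)).1 = t1 ++ pvEvens l.tail ∧
     (l.foldl
      (fun (st : List Char × List Char × Bool) val =>
        if st.2.2 then (st.1 ++ [val], st.2.1, false) else (st.1, st.2.1 ++ [val], true))
      (t1, t2, false)).2.1 = t2 ++ pvEvens l) := by
  induction l with
  | nil => intro t1 t2; simp
  | cons a t ih =>
    intro t1 t2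
    simp only [List.foldl_cons, pvEvens_cons, List.tail_cons]
    constructor
    · obtain ⟨-, h1, h2⟩ := ih (t1 ++ [a]) t2
      constructor <;> simp [h1, h2]
    · obtain ⟨⟨h1, h2⟩, -⟩ := ih t1 (t2 ++ [a])
      constructor <;> simp [h1, h2]

-- the even-index elements, characterised by index gathering
theorem pvEvens_getD (l : List Char) :
    pvEvens l = (List.range ((l.length + 1) / 2)).map (fun j => l.getD (2 * j) 'a') := by
  induction l using pvEvens.induct with
  | case1 => simp
  | case2 a => simp [pvEvens]
  | case3 a b t ih =>
    have hl : ((a :: b :: t).length + 1) / 2 = (t.length + 1) / 2 + 1 := by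
      simp only [List.length_cons]; omega
    rw [hl, List.range_succ_eq_map]
    simp only [pvEvens, List.map_cons, List.map_map]
    congr 1

-- the odd-index elements, characterised by index gathering
theorem pvOdds_getD (l : List Char) :
    pvEvens l.tail = (List.range (l.length / 2)).map (fun j => l.getD (2 * j + 1) 'a') := by
  induction l using pvEvens.induct with
  | case1 => simp
  | case2 a => simp
  | case3 a b t ih =>
    have hl : (a :: b :: t).length / 2 = t.length / 2 + 1 := by
      simp only [List.length_cons]; omega
    rw [hl, List.range_succ_eq_map]
    simp only [List.tail_cons, pvEvens_cons, List.map_cons, List.map_map]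
    congr 1

-- ===== VERDICT (by name: the statement is the Claim_ definition above) =====
theorem transencrypt_spec : Claim_equal_transencrypt := by
  intro msg _
  unfold Spec_transencrypt transencrypt transencrypt_alt
  obtain ⟨⟨h1, h2⟩, -⟩ := pvLoop_eq msg.toList [] []
  simp only [h1, h2, List.nil_append, pvStringify_eq]
  set l := msg.toList with hl
  set n := l.length with hn
  set h := (n + 1) / 2 with hh
  have hle : h ≤ n := by omega
  have hsplit : n = h + n / 2 := by omega
  rw [hsplit, List.range_add, List.map_append]
  have e1 : (List.range h).map
      (fun j => if j < h then l.getD (2 * j) 'a' else l.getD (2 * (j - h) + 1) 'a')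
      = pvEvens l := by
    rw [pvEvens_getD]
    apply List.map_congr_left
    intro j hj
    rw [List.mem_range] at hj
    simp [hj]
  have e2 : ((List.range (n / 2)).map (fun j => h + j)).map
      (fun j => if j < h then l.getD (2 * j) 'a' else l.getD (2 * (j - h) + 1) 'a')
      = pvEvens l.tail := by
    rw [pvOdds_getD, List.map_map]
    apply List.map_congr_left
    intro j _
    have h1 : ¬ (h + j < h) := by omega
    have h2 : h + j - h = j := by omega
    simp [h1, h2]
  rw [e1, e2]
  apply String.ext
  simp
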